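-- pv_equiv track=rewrite | github.com/bartoszkruba/advent_of_code_2020 | day_17/main.py | create_cube
-- ===== SOURCE A (Python) =====
-- def create_cube(shape, content=0):
--     cube = []
--     for z in range(shape[0]):
--         col = []
--         for y in range(shape[1]):
--             row = []
--             for x in range(shape[2]):
--                 row.append(content)
--             col.append(row)
--         cube.append(col)
--     return cube
-- ===== SOURCE B (Python) =====
-- def create_cube(shape, content=0):
--     def build(axis):
--         if axis == 3:
--             return content
--         return [build(axis + 1) for _ in range(shape[axis])]
--     return build(0)
-- ===== Notes on version B (the rewrite author's own statement) =====
-- stated objective: alternative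
-- what changed: Replaces A's three nested accumulator loops by a recursive helper build(axis) that peels one dimension per call, building each level as a fresh list of recursive results and returning content at depth 3.
import Mathlib
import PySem

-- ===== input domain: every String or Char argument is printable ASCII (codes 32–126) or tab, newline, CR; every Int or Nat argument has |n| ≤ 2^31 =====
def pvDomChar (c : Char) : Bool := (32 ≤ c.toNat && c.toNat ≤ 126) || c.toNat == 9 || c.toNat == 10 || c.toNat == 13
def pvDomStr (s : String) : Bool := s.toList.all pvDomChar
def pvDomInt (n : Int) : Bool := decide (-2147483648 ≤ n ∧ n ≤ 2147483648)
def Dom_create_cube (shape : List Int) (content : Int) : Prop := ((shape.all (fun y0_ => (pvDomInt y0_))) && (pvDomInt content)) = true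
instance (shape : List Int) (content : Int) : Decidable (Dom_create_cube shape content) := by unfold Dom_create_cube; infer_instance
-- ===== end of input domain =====

-- B replaces A's three nested accumulator loops by a recursive helper peeling one axis per call; objective: alternative decomposition.

-- ===== PORT A =====
-- literal port of A: three nested for-loops over ranges, each appending to an accumulator
def create_cube (shape : List Int) (content : Int) : List (List (List Int)) :=
  (PySem.List.pyRange 0 (PySem.List.pyGetD shape 0 0) 1).foldl (fun cube _z =>
    cube ++ [(PySem.List.pyRange 0 (PySem.List.pyGetD shape 1 0) 1).foldl (fun col _y =>
      col ++ [(PySem.List.pyRange 0 (PySem.List.pyGetD shape 2 0) 1).foldl (fun row _x =>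
        row ++ [content]) []]) []]) []

-- ===== PORT B =====
-- port of Source B: the recursive build(axis) has a different result type at each depth, so its
-- three recursive levels are transcribed as the three typed helpers build2 → build1 → build0
-- (build(3) = content is the base case inlined at the innermost level)
def create_cube_build2 (shape : List Int) (content : Int) : List Int :=
  (PySem.List.pyRange 0 (PySem.List.pyGetD shape 2 0) 1).map (fun _ => content)
def create_cube_build1 (shape : List Int) (content : Int) : List (List Int) :=
  (PySem.List.pyRange 0 (PySem.List.pyGetD shape 1 0) 1).map (fun _ => create_cube_build2 shape content)
def create_cube_alt (shape : List Int) (content : Int) : List (List (List Int)) :=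
  (PySem.List.pyRange 0 (PySem.List.pyGetD shape 0 0) 1).map (fun _ => create_cube_build1 shape content)

-- ===== PRECONDITION & SPEC =====
-- Pre_ excludes exactly the inputs where both Pythons raise IndexError: shape[0] is always read,
-- shape[1] only when shape[0] > 0, shape[2] only when additionally shape[1] > 0.
def Pre_create_cube (shape : List Int) (content : Int) : Prop :=
  0 < shape.length ∧ (0 < shape.getD 0 0 → (1 < shape.length ∧ (0 < shape.getD 1 0 → 2 < shape.length)))
instance (shape : List Int) (content : Int) : Decidable (Pre_create_cube shape content) := by
  unfold Pre_create_cube; infer_instance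
def pvWitness_create_cube : List Int × Int := ([2, 1, 3], 7)
def Spec_create_cube (shape : List Int) (content : Int) (out : List (List (List Int))) : Prop := out = create_cube_alt shape content
instance (shape : List Int) (content : Int) (out : List (List (List Int))) : Decidable (Spec_create_cube shape content out) := by unfold Spec_create_cube; infer_instance

-- ===== CLAIM (what is proved, stated in full; the proofs are below) =====
def Claim_equal_create_cube : Prop := ∀ (shape : List Int) (content : Int), Dom_create_cube shape content → Pre_create_cube shape content → Spec_create_cube shape content (create_cube shape content)

-- ===== LEMMAS AND PROOFS =====

-- a foldl that appends singletons is a map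
theorem cube_loop_eq {α : Type} (l : List Int) (f : Int → α) :
    l.foldl (fun acc z => acc ++ [f z]) ([] : List α) = l.map f := by
  simp [PySem.List.foldl_append_singleton_eq_map f l []]

-- ===== VERDICT (by name: the statement is the Claim_ definition above) =====
theorem create_cube_spec : Claim_equal_create_cube := by
  intro shape content _ _
  unfold Spec_create_cube create_cube create_cube_alt create_cube_build1 create_cube_build2
  rw [cube_loop_eq]
  refine List.map_congr_left (fun z hz => ?_)
  rw [cube_loop_eq]
  exact List.map_congr_left (fun y hy => cube_loop_eq _ _)
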